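-- pv_equiv track=rewrite | github.com/Dylaaa92/SignalBot | strategies/swing_strategy.py | pivot_low
-- ===== SOURCE A (Python) =====
-- def pivot_low(low, left=5, right=5):
--     """Return index of last confirmed pivot low."""
--     n = len(low)
--     if n < left + right + 1:
--         return None
--     for i in range(n - right - 1, left, -1):
--         l = low[i]
--         if all(l < low[i - j] for j in range(1, left + 1)) and all(
--             l <= low[i + j] for j in range(1, right + 1)
--         ):
--             return i
--     return None
-- ===== SOURCE B (Python) =====
-- def pivot_low(low, left=5, right=5):
--     """Return index of last confirmed pivot low.
--
--     O(n) monotonic-stack algorithm: precompute for each index the nearest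
--     previous element <= it and the nearest next element < it, then the pivot
--     condition is just two distance threshold tests.
--     """
--     n = len(low)
--     if n < left + right + 1:
--         return None
--     # prev_le[i] = largest j < i with low[j] <= low[i], else -1
--     prev_le = []
--     stack = []  # (index, value), values nonincreasing from top
--     for i, v in enumerate(low):
--         while stack and stack[-1][1] > v:
--             stack.pop()
--         prev_le.append(stack[-1][0] if stack else -1)
--         stack.append((i, v))
--     # next_lt[i] = smallest j > i with low[j] < low[i], else n
--     rev = []
--     stack = []
--     for i, v in reversed(list(enumerate(low))):
--         while stack and stack[-1][1] >= v:
--             stack.pop()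
--         rev.append(stack[-1][0] if stack else n)
--         stack.append((i, v))
--     next_lt = rev[::-1]
--     for i in range(n - right - 1, left, -1):
--         if i - prev_le[i] > left and next_lt[i] - i > right:
--             return i
--     return None
-- ===== Notes on version B (the rewrite author's own statement) =====
-- stated objective: alternative
-- what changed: Replaces A's per-candidate window scans (two all() generators per index) by two monotonic-stack passes that precompute, for every index, the nearest previous element <= it and the nearest next element < it, so each candidate is decided by two distance comparisons; worst-case O(n) vs A's O(n*(left+right)), though A's early exit can win on typical data.
-- outside the precondition, e.g. on pivot_low([-3, -2, 0], -3, 4): A returns None, B returns -2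
import Mathlib
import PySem

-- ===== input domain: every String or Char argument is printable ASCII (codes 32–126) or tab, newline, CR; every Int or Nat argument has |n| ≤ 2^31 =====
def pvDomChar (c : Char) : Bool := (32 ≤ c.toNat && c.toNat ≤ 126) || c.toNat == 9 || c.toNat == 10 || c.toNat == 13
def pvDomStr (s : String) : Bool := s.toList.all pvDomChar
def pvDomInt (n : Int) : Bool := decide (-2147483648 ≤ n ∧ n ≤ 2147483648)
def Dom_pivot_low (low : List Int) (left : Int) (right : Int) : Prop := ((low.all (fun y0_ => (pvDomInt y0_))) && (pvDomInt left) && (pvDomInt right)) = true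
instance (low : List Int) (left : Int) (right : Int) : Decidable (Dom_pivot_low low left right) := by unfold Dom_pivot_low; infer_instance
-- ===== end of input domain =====

-- B replaces A's per-candidate window scans by two monotonic-stack passes precomputing
-- nearest previous <= and nearest next < neighbours; return value only (no mutation).

-- ===== PORT A =====
-- all(gen) over range(1, hi): short-circuits at the first False; none = an IndexError raised
-- by the generator (Python's lazy semantics, exact)
def pyAllOpt (f : Int -> Option Bool) : List Int -> Option Bool
  | [] => some true
  | j :: rest =>
      match f j with
      | none => none
      | some false => some false
      | some true => pyAllOpt f rest

-- the body of A's loop: low[i] and the two all(...) generator checks ('and' short-circuits);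
-- none = IndexError
def pivotCheckA? (low : List Int) (left right i : Int) : Option Bool :=
  match PySem.List.pyGet? low i with
  | none => none
  | some l =>
      match pyAllOpt (fun j => (PySem.List.pyGet? low (i - j)).map (fun v => decide (l < v)))
              (PySem.List.pyRange 1 (left + 1) 1) with
      | none => none
      | some false => some false
      | some true =>
          pyAllOpt (fun j => (PySem.List.pyGet? low (i + j)).map (fun v => decide (l <= v)))
            (PySem.List.pyRange 1 (right + 1) 1)

-- A's 'for i in range(start, left, -1): ... return i' loop: Python's range is lazy, so the
-- counter counts down; first hit wins; none = an exception escaped the body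
def pivotLoopA (low : List Int) (left right i : Int) : Option (Option Int) :=
  if _h : left < i then
    match pivotCheckA? low left right i with
    | none => none
    | some true => some (some i)
    | some false => pivotLoopA low left right (i - 1)
  else some none
termination_by (i - left).toNat
decreasing_by omega

def pivot_low (low : List Int) (left : Int) (right : Int) : Option Int :=
  let n : Int := (low.length : Int)
  if n < left + right + 1 then none
  else
    match pivotLoopA low left right (n - right - 1) with
    | some v => v
    | none => none   -- Python raised here (outside Pre_)

-- ===== PORT B =====
-- 'while stack and stack[-1][1] > v: stack.pop()'  (list head = Python stack top)
def popGT (v : Int) : List (Int × Int) → List (Int × Int)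
  | [] => []
  | (j, w) :: rest => if v < w then popGT v rest else (j, w) :: rest

-- 'while stack and stack[-1][1] >= v: stack.pop()'
def popGE (v : Int) : List (Int × Int) → List (Int × Int)
  | [] => []
  | (j, w) :: rest => if v ≤ w then popGE v rest else (j, w) :: rest

-- 'stack[-1][0] if stack else d'
def topIdx (s : List (Int × Int)) (d : Int) : Int :=
  match s with
  | [] => d
  | (j, _) :: _ => j

-- body of B's forward 'for i, v in enumerate(low)' loop: state = (stack, prev_le)
def prevStep (st : List (Int × Int) × List Int) (iv : Int × Int) : List (Int × Int) × List Int :=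
  let s := popGT iv.2 st.1
  (iv :: s, st.2 ++ [topIdx s (-1)])

def prevPass (low : List Int) : List Int :=
  ((PySem.List.enumerate low).foldl prevStep ([], [])).2

-- body of B's backward 'for i, v in reversed(list(enumerate(low)))' loop
def nextStep (n : Int) (st : List (Int × Int) × List Int) (iv : Int × Int) : List (Int × Int) × List Int :=
  let s := popGE iv.2 st.1
  (iv :: s, st.2 ++ [topIdx s n])

-- rev[::-1] is list reversal (ported by hand as .reverse; exact)
def nextPass (low : List Int) : List Int :=
  (((PySem.List.enumerate low).reverse.foldl (nextStep (low.length : Int)) ([], [])).2).reverse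

-- B's final 'for i in range(n - right - 1, left, -1)' scan; the 'and' short-circuits, so the
-- second lookup happens only when the first test passes; none = IndexError
def scanB (prev next : List Int) (left right i : Int) : Option (Option Int) :=
  if _h : left < i then
    match PySem.List.pyGet? prev i with
    | none => none
    | some p =>
        if left < i - p then
          match PySem.List.pyGet? next i with
          | none => none
          | some q =>
              if right < q - i then some (some i)
              else scanB prev next left right (i - 1)
        else scanB prev next left right (i - 1)
  else some none
termination_by (i - left).toNat
decreasing_by all_goals omega

def pivot_low_alt (low : List Int) (left : Int) (right : Int) : Option Int :=
  let n : Int := (low.length : Int)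
  if n < left + right + 1 then none
  else
    let prev_le := prevPass low
    let next_lt := nextPass low
    match scanB prev_le next_lt left right (n - right - 1) with
    | some v => v
    | none => none   -- Python raised here (outside Pre_)

-- ===== PRECONDITION & SPEC =====
-- Pre_ admits the natural domain of nonnegative window sizes (plus too-short inputs, where
-- both sides trivially return None); it excludes negative window sizes with a running loop,
-- where A raises IndexError (right < 0) or reads neighbours through Python's negative-index
-- wraparound (left < 0, an artefact outside the task's natural domain).
def Pre_pivot_low (low : List Int) (left : Int) (right : Int) : Prop :=
  (0 ≤ left ∧ 0 ≤ right) ∨ (low.length : Int) ≤ left + right + 1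
instance (low : List Int) (left : Int) (right : Int) : Decidable (Pre_pivot_low low left right) := by unfold Pre_pivot_low; infer_instance

def pvWitness_pivot_low : List Int × Int × Int := ([3, 2, 1, 2, 3], 1, 1)

def Spec_pivot_low (low : List Int) (left : Int) (right : Int) (out : Option Int) : Prop := out = pivot_low_alt low left right
instance (low : List Int) (left : Int) (right : Int) (out : Option Int) : Decidable (Spec_pivot_low low left right out) := by unfold Spec_pivot_low; infer_instance

-- ===== CLAIM (what is proved, stated in full; the proofs are below) =====
def Claim_equal_pivot_low : Prop := ∀ (low : List Int) (left : Int) (right : Int), Dom_pivot_low low left right → Pre_pivot_low low left right → Spec_pivot_low low left right (pivot_low low left right)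

-- ===== LEMMAS AND PROOFS =====

-- ---- specification of what the two stack passes compute ----

-- largest j < i with low[j] <= v, else -1
def prevAux (low : List Int) (v : Int) : Nat → Int
  | 0 => -1
  | j + 1 => if low.getD j 0 ≤ v then (j : Int) else prevAux low v j

def prevSpec (low : List Int) (i : Nat) : Int := prevAux low (low.getD i 0) i

-- smallest k >= start with low[k] < v, else low.length
def nextAux (low : List Int) (v : Int) (k : Nat) : Int :=
  if _h : k < low.length then
    if low.getD k 0 < v then (k : Int) else nextAux low v (k + 1)
  else (low.length : Int)
termination_by low.length - k

def nextSpec (low : List Int) (i : Nat) : Int := nextAux low (low.getD i 0) (i + 1)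

theorem prevAux_bounds (low : List Int) (v : Int) (i : Nat) :
    -1 ≤ prevAux low v i ∧ prevAux low v i < (i : Int) := by
  induction i with
  | zero => simp [prevAux]
  | succ j ih => unfold prevAux; split <;> omega

theorem prevAux_le (low : List Int) (v : Int) (i : Nat) (h : 0 ≤ prevAux low v i) :
    low.getD (prevAux low v i).toNat 0 ≤ v := by
  induction i with
  | zero => simp [prevAux] at h
  | succ j ih =>
      unfold prevAux at h ⊢
      by_cases hle : low.getD j 0 ≤ v
      · rw [if_pos hle]; simpa using hle
      · rw [if_neg hle] at h ⊢; exact ih h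

theorem prevAux_gt (low : List Int) (v : Int) (i : Nat) :
    ∀ k : Nat, prevAux low v i < (k : Int) → k < i → v < low.getD k 0 := by
  induction i with
  | zero => intro k _ hk; omega
  | succ j ih =>
      intro k h1 h2
      unfold prevAux at h1
      by_cases hle : low.getD j 0 ≤ v
      · rw [if_pos hle] at h1
        omega
      · rw [if_neg hle] at h1
        rcases Nat.lt_succ_iff_lt_or_eq.mp h2 with h | rfl
        · exact ih k h1 h
        · omega

theorem prevAux_max (low : List Int) (v : Int) (i : Nat) (j : Nat) (hj : j < i)
    (hle : low.getD j 0 ≤ v) : (j : Int) ≤ prevAux low v i := by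
  by_contra h
  exact absurd (prevAux_gt low v i j (by omega) hj) (by omega)

theorem nextAux_bounds' (low : List Int) (v : Int) (k : Nat) (hk : k ≤ low.length) :
    (k : Int) ≤ nextAux low v k ∧ nextAux low v k ≤ (low.length : Int) := by
  fun_induction nextAux low v k with
  | case1 k h hlt => omega
  | case2 k h hlt ih => omega
  | case3 k h => omega

theorem nextAux_lt (low : List Int) (v : Int) (k : Nat)
    (h : nextAux low v k < (low.length : Int)) :
    low.getD (nextAux low v k).toNat 0 < v := by
  fun_induction nextAux low v k with
  | case1 k hh hlt => simpa using hlt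
  | case2 k hh hlt ih => exact ih h
  | case3 k hh => omega

theorem nextAux_ge (low : List Int) (v : Int) (k : Nat) :
    ∀ m : Nat, k ≤ m → (m : Int) < nextAux low v k → v ≤ low.getD m 0 := by
  fun_induction nextAux low v k with
  | case1 k hh hlt => intro m h1 h2; omega
  | case2 k hh hlt ih =>
      intro m h1 h2
      rcases Nat.eq_or_lt_of_le h1 with rfl | h
      · omega
      · exact ih m (by omega) h2
  | case3 k hh => intro m h1 h2; omega

theorem nextAux_min (low : List Int) (v : Int) (k : Nat) (m : Nat) (hm : k ≤ m)
    (hlen : m < low.length) (hlt : low.getD m 0 < v) : nextAux low v k ≤ (m : Int) := by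
  fun_induction nextAux low v k with
  | case1 k hh h => omega
  | case2 k hh h ih =>
      rcases Nat.eq_or_lt_of_le hm with rfl | hmk
      · omega
      · exact ih (by omega)
  | case3 k hh => omega

-- ---- the stacks the two passes maintain ----

def stackOf (low : List Int) : Nat → List (Int × Int)
  | 0 => []
  | m + 1 => ((m : Int), low.getD m 0) :: popGT (low.getD m 0) (stackOf low m)

-- backward stack after processing the last c indices (n-1 down to n-c)
def stackN (low : List Int) : Nat → List (Int × Int)
  | 0 => []
  | c + 1 =>
      ((((low.length - (c + 1) : Nat)) : Int), low.getD (low.length - (c + 1)) 0)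
        :: popGE (low.getD (low.length - (c + 1)) 0) (stackN low c)

theorem popGT_suffix (v : Int) (s : List (Int × Int)) : popGT v s <:+ s := by
  induction s with
  | nil => simp [popGT]
  | cons hd tl ih =>
      obtain ⟨j, w⟩ := hd
      unfold popGT
      split
      · exact ih.trans (List.suffix_cons _ _)
      · exact List.suffix_refl _

theorem popGE_suffix (v : Int) (s : List (Int × Int)) : popGE v s <:+ s := by
  induction s with
  | nil => simp [popGE]
  | cons hd tl ih =>
      obtain ⟨j, w⟩ := hd
      unfold popGE
      split
      · exact ih.trans (List.suffix_cons _ _)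
      · exact List.suffix_refl _

theorem popGT_mem (v : Int) (s : List (Int × Int)) (p : Int × Int) (hp : p ∈ s)
    (hle : p.2 ≤ v) : p ∈ popGT v s := by
  induction s with
  | nil => simp at hp
  | cons hd tl ih =>
      obtain ⟨j, w⟩ := hd
      unfold popGT
      split
      · rcases List.mem_cons.mp hp with rfl | h
        · simp at hle; omega
        · exact ih h
      · exact hp

theorem popGE_mem (v : Int) (s : List (Int × Int)) (p : Int × Int) (hp : p ∈ s)
    (hlt : p.2 < v) : p ∈ popGE v s := by
  induction s with
  | nil => simp at hp
  | cons hd tl ih =>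
      obtain ⟨j, w⟩ := hd
      unfold popGE
      split
      · rcases List.mem_cons.mp hp with rfl | h
        · simp at hlt; omega
        · exact ih h
      · exact hp

theorem popGT_all_le (v : Int) (s : List (Int × Int))
    (hs : s.Pairwise (fun a b => b.2 ≤ a.2)) : ∀ p ∈ popGT v s, p.2 ≤ v := by
  induction s with
  | nil => simp [popGT]
  | cons hd tl ih =>
      obtain ⟨j, w⟩ := hd
      rw [List.pairwise_cons] at hs
      unfold popGT
      by_cases hvw : v < w
      · rw [if_pos hvw]; exact ih hs.2
      · rw [if_neg hvw]
        intro p hp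
        rcases List.mem_cons.mp hp with rfl | h
        · simp; omega
        · exact le_trans (hs.1 p h) (by simp; omega)

theorem popGE_all_lt (v : Int) (s : List (Int × Int))
    (hs : s.Pairwise (fun a b => b.2 < a.2)) : ∀ p ∈ popGE v s, p.2 < v := by
  induction s with
  | nil => simp [popGE]
  | cons hd tl ih =>
      obtain ⟨j, w⟩ := hd
      rw [List.pairwise_cons] at hs
      unfold popGE
      by_cases hvw : v ≤ w
      · rw [if_pos hvw]; exact ih hs.2
      · rw [if_neg hvw]
        intro p hp
        rcases List.mem_cons.mp hp with rfl | h
        · simp; omega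
        · exact lt_trans (hs.1 p h) (by simp; omega)

-- the forward-stack invariant, all four components at once
theorem stackOf_inv (low : List Int) (m : Nat) :
    (∀ p ∈ stackOf low m, ∃ j : Nat, p = ((j : Int), low.getD j 0) ∧ j < m ∧
        ∀ k, j < k → k < m → low.getD j 0 ≤ low.getD k 0)
    ∧ (∀ j : Nat, j < m → (∀ k, j < k → k < m → low.getD j 0 ≤ low.getD k 0) →
        ((j : Int), low.getD j 0) ∈ stackOf low m)
    ∧ (stackOf low m).Pairwise (fun a b => b.1 < a.1)
    ∧ (stackOf low m).Pairwise (fun a b => b.2 ≤ a.2) := by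
  induction m with
  | zero => simp [stackOf]
  | succ m ih =>
      obtain ⟨hS, hC, hI, hV⟩ := ih
      have htsub : ∀ p ∈ popGT (low.getD m 0) (stackOf low m), p ∈ stackOf low m :=
        fun p hp => (popGT_suffix _ _).subset hp
      have htle := popGT_all_le (low.getD m 0) (stackOf low m) hV
      refine ⟨?_, ?_, ?_, ?_⟩
      · intro p hp
        rcases List.mem_cons.mp hp with rfl | hp'
        · exact ⟨m, rfl, by omega, fun k h1 h2 => by omega⟩
        · obtain ⟨j, rfl, hjm, hvis⟩ := hS p (htsub p hp')
          refine ⟨j, rfl, by omega, fun k h1 h2 => ?_⟩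
          rcases Nat.lt_succ_iff_lt_or_eq.mp h2 with h | rfl
          · exact hvis k h1 h
          · exact htle _ hp'
      · intro j hj hvis
        rcases Nat.lt_succ_iff_lt_or_eq.mp hj with hj' | rfl
        · refine List.mem_cons_of_mem _ ?_
          refine popGT_mem _ _ _ (hC j hj' (fun k h1 h2 => hvis k h1 (by omega))) ?_
          exact hvis m hj' (by omega)
        · exact List.mem_cons_self ..
      · rw [show stackOf low (m + 1) = ((m : Int), low.getD m 0) ::
              popGT (low.getD m 0) (stackOf low m) from rfl, List.pairwise_cons]
        refine ⟨?_, hI.sublist (popGT_suffix _ _).sublist⟩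
        intro p hp
        obtain ⟨j, rfl, hjm, _⟩ := hS p (htsub p hp)
        simp
        omega
      · rw [show stackOf low (m + 1) = ((m : Int), low.getD m 0) ::
              popGT (low.getD m 0) (stackOf low m) from rfl, List.pairwise_cons]
        exact ⟨htle, hV.sublist (popGT_suffix _ _).sublist⟩

theorem stackN_inv (low : List Int) (c : Nat) (hc : c ≤ low.length) :
    (∀ p ∈ stackN low c, ∃ j : Nat, p = ((j : Int), low.getD j 0) ∧ low.length - c ≤ j ∧
        j < low.length ∧ ∀ k, low.length - c ≤ k → k < j → low.getD j 0 < low.getD k 0)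
    ∧ (∀ j : Nat, low.length - c ≤ j → j < low.length →
        (∀ k, low.length - c ≤ k → k < j → low.getD j 0 < low.getD k 0) →
        ((j : Int), low.getD j 0) ∈ stackN low c)
    ∧ (stackN low c).Pairwise (fun a b => a.1 < b.1)
    ∧ (stackN low c).Pairwise (fun a b => b.2 < a.2) := by
  induction c with
  | zero =>
      refine ⟨by simp [stackN], fun j h1 h2 _ => absurd h2 (by omega), by simp [stackN], by simp [stackN]⟩
  | succ c ih =>
      obtain ⟨hS, hC, hI, hV⟩ := ih (by omega)
      have hcons : stackN low (c + 1)
          = (((low.length - (c + 1) : Nat) : Int), low.getD (low.length - (c + 1)) 0)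
            :: popGE (low.getD (low.length - (c + 1)) 0) (stackN low c) := rfl
      have htsub : ∀ p ∈ popGE (low.getD (low.length - (c + 1)) 0) (stackN low c), p ∈ stackN low c :=
        fun p hp => (popGE_suffix _ _).subset hp
      have htlt := popGE_all_lt (low.getD (low.length - (c + 1)) 0) (stackN low c) hV
      rw [hcons]
      refine ⟨?_, ?_, ?_, ?_⟩
      · intro p hp
        rcases List.mem_cons.mp hp with rfl | hp'
        · exact ⟨low.length - (c + 1), rfl, by omega, by omega, fun k h1 h2 => by omega⟩
        · obtain ⟨j, rfl, hj1, hj2, hvis⟩ := hS p (htsub p hp')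
          refine ⟨j, rfl, by omega, hj2, fun k h1 h2 => ?_⟩
          rcases Nat.eq_or_lt_of_le h1 with rfl | h
          · exact htlt _ hp'
          · exact hvis k (by omega) h2
      · intro j hj1 hj2 hvis
        rcases Nat.eq_or_lt_of_le hj1 with rfl | hj'
        · exact List.mem_cons_self ..
        · refine List.mem_cons_of_mem _ ?_
          refine popGE_mem _ _ _ (hC j (by omega) hj2 (fun k h1 h2 => hvis k (by omega) h2)) ?_
          exact hvis (low.length - (c + 1)) (by omega) (by omega)
      · rw [List.pairwise_cons]
        refine ⟨?_, hI.sublist (popGE_suffix _ _).sublist⟩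
        intro p hp
        obtain ⟨j, rfl, hj1, hj2, _⟩ := hS p (htsub p hp)
        simp
        omega
      · rw [List.pairwise_cons]
        exact ⟨htlt, hV.sublist (popGE_suffix _ _).sublist⟩

theorem popGT_head_le (v : Int) (s : List (Int × Int)) (hd : Int × Int) (tl : List (Int × Int))
    (h : popGT v s = hd :: tl) : hd.2 ≤ v := by
  induction s with
  | nil => simp [popGT] at h
  | cons x xs ih =>
      obtain ⟨j, w⟩ := x
      unfold popGT at h
      split at h
      · exact ih h
      · cases h; simpa using by omega

theorem popGE_head_lt (v : Int) (s : List (Int × Int)) (hd : Int × Int) (tl : List (Int × Int))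
    (h : popGE v s = hd :: tl) : hd.2 < v := by
  induction s with
  | nil => simp [popGE] at h
  | cons x xs ih =>
      obtain ⟨j, w⟩ := x
      unfold popGE at h
      split at h
      · exact ih h
      · cases h; simpa using by omega

-- the value B's forward pass records at step m is exactly prevAux
theorem stackOf_top (low : List Int) (m : Nat) (v : Int) :
    topIdx (popGT v (stackOf low m)) (-1) = prevAux low v m := by
  obtain ⟨hS, hC, hI, hV⟩ := stackOf_inv low m
  have hb := prevAux_bounds low v m
  rcases h : popGT v (stackOf low m) with _ | ⟨hd, tl⟩
  · simp only [topIdx]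
    by_contra hne
    have h0 : 0 ≤ prevAux low v m := by omega
    have hjm : (prevAux low v m).toNat < m := by omega
    have hle := prevAux_le low v m h0
    have hvis : ∀ k, (prevAux low v m).toNat < k → k < m →
        low.getD (prevAux low v m).toNat 0 ≤ low.getD k 0 := by
      intro k h1 h2
      have := prevAux_gt low v m k (by omega) h2
      omega
    have hmem := popGT_mem v _ _ (hC _ hjm hvis) (by simpa using hle)
    rw [h] at hmem
    simp at hmem
  · obtain ⟨j, rfl, hjm, hvis⟩ := hS hd ((popGT_suffix v _).subset (h ▸ List.mem_cons_self ..))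
    have hhd : low.getD j 0 ≤ v := by simpa using popGT_head_le v _ _ _ h
    have h1 : (j : Int) ≤ prevAux low v m := prevAux_max low v m j hjm hhd
    have h2 : prevAux low v m ≤ (j : Int) := by
      by_contra hgt
      have h0 : 0 ≤ prevAux low v m := by omega
      have hj'm : (prevAux low v m).toNat < m := by omega
      have hle' := prevAux_le low v m h0
      have hvis' : ∀ k, (prevAux low v m).toNat < k → k < m →
          low.getD (prevAux low v m).toNat 0 ≤ low.getD k 0 := by
        intro k hk1 hk2
        have := prevAux_gt low v m k (by omega) hk2
        omega
      have hmem' := popGT_mem v _ _ (hC _ hj'm hvis') (by simpa using hle')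
      rw [h] at hmem'
      have hIt := hI.sublist (popGT_suffix v _).sublist
      rw [h, List.pairwise_cons] at hIt
      rcases List.mem_cons.mp hmem' with heq | hmem''
      · have := congrArg Prod.fst heq
        simp at this
        omega
      · have := hIt.1 _ hmem''
        simp at this
        omega
    simp only [topIdx]
    omega

theorem stackN_top (low : List Int) (c : Nat) (hc : c ≤ low.length) (v : Int) :
    topIdx (popGE v (stackN low c)) (low.length : Int) = nextAux low v (low.length - c) := by
  obtain ⟨hS, hC, hI, hV⟩ := stackN_inv low c hc
  have hb := nextAux_bounds' low v (low.length - c) (by omega)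
  rcases h : popGE v (stackN low c) with _ | ⟨hd, tl⟩
  · simp only [topIdx]
    by_contra hne
    have hlt : nextAux low v (low.length - c) < (low.length : Int) := by omega
    have hk1 : low.length - c ≤ (nextAux low v (low.length - c)).toNat := by omega
    have hk2 : (nextAux low v (low.length - c)).toNat < low.length := by omega
    have hlow := nextAux_lt low v (low.length - c) hlt
    have hvis : ∀ k, low.length - c ≤ k → k < (nextAux low v (low.length - c)).toNat →
        low.getD (nextAux low v (low.length - c)).toNat 0 < low.getD k 0 := by
      intro k h1 h2
      have := nextAux_ge low v (low.length - c) k h1 (by omega)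
      omega
    have hmem := popGE_mem v _ _ (hC _ hk1 hk2 hvis) (by simpa using hlow)
    rw [h] at hmem
    simp at hmem
  · obtain ⟨j, rfl, hj1, hj2, hvis⟩ := hS hd ((popGE_suffix v _).subset (h ▸ List.mem_cons_self ..))
    have hhd : low.getD j 0 < v := by simpa using popGE_head_lt v _ _ _ h
    have h1 : nextAux low v (low.length - c) ≤ (j : Int) :=
      nextAux_min low v (low.length - c) j hj1 hj2 hhd
    have h2 : (j : Int) ≤ nextAux low v (low.length - c) := by
      by_contra hgt
      have hk1 : low.length - c ≤ (nextAux low v (low.length - c)).toNat := by omega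
      have hk2 : (nextAux low v (low.length - c)).toNat < low.length := by omega
      have hlow := nextAux_lt low v (low.length - c) (by omega)
      have hvis' : ∀ k, low.length - c ≤ k → k < (nextAux low v (low.length - c)).toNat →
          low.getD (nextAux low v (low.length - c)).toNat 0 < low.getD k 0 := by
        intro k hh1 hh2
        have := nextAux_ge low v (low.length - c) k hh1 (by omega)
        omega
      have hmem' := popGE_mem v _ _ (hC _ hk1 hk2 hvis') (by simpa using hlow)
      rw [h] at hmem'
      have hIt := hI.sublist (popGE_suffix v _).sublist
      rw [h, List.pairwise_cons] at hIt
      rcases List.mem_cons.mp hmem' with heq | hmem''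
      · have := congrArg Prod.fst heq
        simp at this
        omega
      · have := hIt.1 _ hmem''
        simp at this
        omega
    simp only [topIdx]
    omega

-- ---- the two passes compute prevSpec / nextSpec pointwise ----

theorem prevPass_fold (low : List Int) (m : Nat) :
    ((PySem.List.pyRange 0 (m : Int)).map (fun j => (j, PySem.List.pyGetD low j 0))).foldl
        prevStep ([], [])
      = (stackOf low m, (List.range m).map (fun i => prevSpec low i)) := by
  induction m with
  | zero => simp [PySem.List.pyRange_one_eq_nil (by omega : (0:Int) ≤ 0), stackOf]
  | succ m ih =>
      have hcast : ((m + 1 : Nat) : Int) = (m : Int) + 1 := by push_cast; ring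
      rw [hcast, PySem.List.pyRange_one_succ_right (by omega : (0:Int) ≤ (m:Int)),
          List.map_append, List.foldl_append, ih]
      simp only [List.map_cons, List.map_nil, List.foldl_cons, List.foldl_nil, prevStep,
        PySem.List.pyGetD_natCast, List.range_succ, List.map_append]
      exact Prod.ext rfl (by rw [stackOf_top]; rfl)

theorem prevPass_eq (low : List Int) :
    prevPass low = (List.range low.length).map (fun i => prevSpec low i) := by
  unfold prevPass
  rw [PySem.List.enumerate_eq_map_pyRange low 0,
      show PySem.List.len low = ((low.length : Nat) : Int) from rfl, prevPass_fold]

theorem nextPass_fold (low : List Int) (m : Nat) (hm : m ≤ low.length)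
    (acc : List Int) :
    ((PySem.List.pyRange ((m : Int) - 1) (-1) (-1)).map
        (fun j => (j, PySem.List.pyGetD low j 0))).foldl
        (nextStep (low.length : Int)) (stackN low (low.length - m), acc)
      = (stackN low low.length,
         acc ++ (List.range m).reverse.map (fun i => nextSpec low i)) := by
  induction m generalizing acc with
  | zero =>
      rw [show ((0 : Nat) : Int) - 1 = -1 by norm_num,
          PySem.List.pyRange_neg_one_eq_nil le_rfl]
      simp
  | succ m ih =>
      have hcast : ((m + 1 : Nat) : Int) - 1 = (m : Int) := by push_cast; ring
      rw [hcast, PySem.List.pyRange_neg_one_cons (by omega : (-1 : Int) < (m : Int)),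
          List.map_cons, List.foldl_cons]
      have hstep : nextStep (low.length : Int) (stackN low (low.length - (m + 1)), acc)
            ((m : Int), PySem.List.pyGetD low (m : Int) 0)
          = (stackN low (low.length - m),
             acc ++ [nextSpec low m]) := by
        simp only [nextStep, PySem.List.pyGetD_natCast]
        refine Prod.ext ?_ ?_
        · show (((m : Nat) : Int), low.getD m 0) :: _ = _
          rw [show low.length - m = (low.length - (m + 1)) + 1 by omega]
          show _ = (((low.length - ((low.length - (m + 1)) + 1) : Nat) : Int),
              low.getD (low.length - ((low.length - (m + 1)) + 1)) 0)
            :: popGE (low.getD (low.length - ((low.length - (m + 1)) + 1)) 0)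
                (stackN low (low.length - (m + 1)))
          rw [show low.length - ((low.length - (m + 1)) + 1) = m by omega]
        · show acc ++ [topIdx (popGE (low.getD m 0) (stackN low (low.length - (m + 1))))
              (low.length : Int)] = _
          rw [stackN_top low (low.length - (m + 1)) (by omega) (low.getD m 0),
              show low.length - (low.length - (m + 1)) = m + 1 by omega]
          rfl
      rw [hstep, ih (by omega)]
      rw [List.range_succ, List.reverse_append, List.reverse_cons, List.reverse_nil,
          List.nil_append]
      simp

theorem nextPass_eq (low : List Int) :
    nextPass low = (List.range low.length).map (fun i => nextSpec low i) := by
  unfold nextPass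
  rw [PySem.List.enumerate_eq_map_pyRange low 0,
      show PySem.List.len low = ((low.length : Nat) : Int) from rfl,
      ← List.map_reverse,
      show (PySem.List.pyRange 0 ((low.length : Nat) : Int)).reverse
          = PySem.List.pyRange (((low.length : Nat) : Int) - 1) (-1) (-1) by
        rw [PySem.List.pyRange_neg_one_eq_reverse]; norm_num,
      show ([] : List (Int × Int)) = stackN low (low.length - low.length) by
        rw [Nat.sub_self]; rfl,
      nextPass_fold low low.length le_rfl []]
  simp [List.map_reverse]

-- ---- pointwise equality of the two per-candidate conditions ----

-- the condition A decides for a candidate i (A's all(...) form, total indexing)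
def pivotCond (low : List Int) (left right i : Int) : Bool :=
  ((PySem.List.pyRange 1 (left + 1) 1).all fun j =>
      decide (low.getD i.toNat 0 < low.getD (i - j).toNat 0)) &&
  ((PySem.List.pyRange 1 (right + 1) 1).all fun j =>
      decide (low.getD i.toNat 0 ≤ low.getD (i + j).toNat 0))

-- the condition B decides for a candidate i (threshold tests on the two precomputed indices)
def condB (low : List Int) (left right i : Int) : Bool :=
  decide (left < i - prevSpec low i.toNat) && decide (right < nextSpec low i.toNat - i)

theorem left_eq (low : List Int) (left i : Int) (hl : 0 ≤ left) (hi1 : left + 1 ≤ i) :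
    ((PySem.List.pyRange 1 (left + 1) 1).all fun j =>
        decide (low.getD i.toNat 0 < low.getD (i - j).toNat 0))
      = decide (left < i - prevSpec low i.toNat) := by
  have hp : prevSpec low i.toNat = prevAux low (low.getD i.toNat 0) i.toNat := rfl
  have hb := prevAux_bounds low (low.getD i.toNat 0) i.toNat
  rw [Bool.eq_iff_iff]
  simp only [List.all_eq_true, PySem.List.mem_pyRange_one, decide_eq_true_eq]
  constructor
  · intro H
    by_contra hc
    have h0 : 0 ≤ prevSpec low i.toNat := by omega
    have hle := prevAux_le low (low.getD i.toNat 0) i.toNat (hp ▸ h0)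
    have hj := H (i - prevSpec low i.toNat) ⟨by omega, by omega⟩
    rw [show i - (i - prevSpec low i.toNat) = prevSpec low i.toNat by ring] at hj
    rw [← hp] at hle
    omega
  · intro h j hj
    obtain ⟨hj1, hj2⟩ := hj
    exact prevAux_gt low (low.getD i.toNat 0) i.toNat (i - j).toNat (by omega) (by omega)

theorem right_eq (low : List Int) (right i : Int) (hr : 0 ≤ right) (hi0 : 0 ≤ i)
    (hi2 : i < (low.length : Int) - right) :
    ((PySem.List.pyRange 1 (right + 1) 1).all fun j =>
        decide (low.getD i.toNat 0 ≤ low.getD (i + j).toNat 0))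
      = decide (right < nextSpec low i.toNat - i) := by
  have hq : nextSpec low i.toNat = nextAux low (low.getD i.toNat 0) (i.toNat + 1) := rfl
  have hb := nextAux_bounds' low (low.getD i.toNat 0) (i.toNat + 1) (by omega)
  rw [Bool.eq_iff_iff]
  simp only [List.all_eq_true, PySem.List.mem_pyRange_one, decide_eq_true_eq]
  rw [← hq] at hb
  constructor
  · intro H
    by_contra hc
    have hqn : nextSpec low i.toNat < (low.length : Int) := by omega
    have hlow := nextAux_lt low (low.getD i.toNat 0) (i.toNat + 1) (hq ▸ hqn)
    rw [← hq] at hlow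
    have hj := H (nextSpec low i.toNat - i) ⟨by omega, by omega⟩
    rw [show i + (nextSpec low i.toNat - i) = nextSpec low i.toNat by ring] at hj
    omega
  · intro h j hj
    obtain ⟨hj1, hj2⟩ := hj
    have := nextAux_ge low (low.getD i.toNat 0) (i.toNat + 1) (i + j).toNat (by omega) (by omega)
    exact this

-- ---- reducing the two loops to find? over the same countdown range ----

theorem pyGet?_pos (xs : List Int) (k : Int) (h0 : 0 <= k) (h1 : k.toNat < xs.length) :
    PySem.List.pyGet? xs k = some (xs[k.toNat]'h1) := by
  obtain ⟨n, rfl⟩ : ∃ n : Nat, k = (n : Int) := ⟨k.toNat, by omega⟩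
  rw [PySem.List.pyGet?_natCast]
  simp only [Int.toNat_natCast] at h1 ⊢
  exact List.getElem?_eq_getElem h1

theorem pyAllOpt_eq (f : Int → Option Bool) (g : Int → Bool) (l : List Int)
    (h : ∀ j ∈ l, f j = some (g j)) : pyAllOpt f l = some (l.all g) := by
  induction l with
  | nil => rfl
  | cons j rest ih =>
      rw [pyAllOpt, h j (by simp)]
      cases hg : g j
      · simp [hg]
      · dsimp only
        rw [ih (fun x hx => h x (by simp [hx]))]
        simp [hg]

theorem checkA?_eq (low : List Int) (left right i : Int)
    (hl : 0 <= left) (hr : 0 <= right)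
    (hi1 : left + 1 <= i) (hi2 : i < (low.length : Int) - right) :
    pivotCheckA? low left right i = some (pivotCond low left right i) := by
  unfold pivotCheckA? pivotCond
  rw [pyGet?_pos low i (by omega) (by omega)]
  rw [show low[i.toNat]'(by omega) = low.getD i.toNat 0 from
        (List.getD_eq_getElem low 0 (by omega)).symm]
  dsimp only
  rw [pyAllOpt_eq _ (fun j => decide (low.getD i.toNat 0 < low.getD (i - j).toNat 0)) _
        (by
          intro j hj
          rw [PySem.List.mem_pyRange_one] at hj
          rw [pyGet?_pos low (i - j) (by omega) (by omega)]
          simp only [Option.map_some,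
            List.getD_eq_getElem low 0 (show (i - j).toNat < low.length by omega),
            List.getD_eq_getElem low 0 (show i.toNat < low.length by omega)]),
      pyAllOpt_eq _ (fun j => decide (low.getD i.toNat 0 <= low.getD (i + j).toNat 0)) _
        (by
          intro j hj
          rw [PySem.List.mem_pyRange_one] at hj
          rw [pyGet?_pos low (i + j) (by omega) (by omega)]
          simp only [Option.map_some,
            List.getD_eq_getElem low 0 (show (i + j).toNat < low.length by omega),
            List.getD_eq_getElem low 0 (show i.toNat < low.length by omega)])]
  generalize ((PySem.List.pyRange 1 (left + 1) 1).all fun j =>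
      decide (low.getD i.toNat 0 < low.getD (i - j).toNat 0)) = A
  generalize ((PySem.List.pyRange 1 (right + 1) 1).all fun j =>
      decide (low.getD i.toNat 0 ≤ low.getD (i + j).toNat 0)) = B
  cases A <;> cases B <;> rfl

theorem loopA_eq (low : List Int) (left right : Int) (p : Int → Bool) :
    ∀ (k : Nat) (i : Int), (i - left).toNat = k →
      (∀ j, left < j → j <= i → pivotCheckA? low left right j = some (p j)) →
      pivotLoopA low left right i = some ((PySem.List.pyRange i left (-1)).find? p) := by
  intro k
  induction k with
  | zero =>
      intro i hk hp
      unfold pivotLoopA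
      rw [dif_neg (by omega : ¬ left < i), PySem.List.pyRange_neg_one_eq_nil (by omega)]
      rfl
  | succ k ih =>
      intro i hk hp
      have hlt : left < i := by omega
      unfold pivotLoopA
      rw [dif_pos hlt, hp i hlt le_rfl, PySem.List.pyRange_neg_one_cons hlt]
      cases hpi : p i
      · dsimp only
        rw [ih (i - 1) (by omega) (fun j h1 h2 => hp j h1 (by omega))]
        simp [List.find?, hpi]
      · simp [List.find?, hpi]

theorem loopB_eq (prev next : List Int) (left right : Int) (p : Int → Bool) :
    ∀ (k : Nat) (i : Int), (i - left).toNat = k →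
      (∀ j, left < j → j ≤ i →
        ∃ pj qj, PySem.List.pyGet? prev j = some pj ∧ PySem.List.pyGet? next j = some qj ∧
          p j = (decide (left < j - pj) && decide (right < qj - j))) →
      scanB prev next left right i = some ((PySem.List.pyRange i left (-1)).find? p) := by
  intro k
  induction k with
  | zero =>
      intro i hk hp
      unfold scanB
      rw [dif_neg (by omega : ¬ left < i), PySem.List.pyRange_neg_one_eq_nil (by omega)]
      rfl
  | succ k ih =>
      intro i hk hp
      have hlt : left < i := by omega
      obtain ⟨pi, qi, hpi, hqi, hcond⟩ := hp i hlt le_rfl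
      unfold scanB
      rw [dif_pos hlt, hpi, PySem.List.pyRange_neg_one_cons hlt]
      dsimp only
      by_cases h1 : left < i - pi
      · rw [if_pos h1, hqi]
        dsimp only
        by_cases h2 : right < qi - i
        · rw [if_pos h2]
          have hv : p i = true := by rw [hcond]; simp [h1, h2]
          simp [List.find?, hv]
        · rw [if_neg h2, ih (i - 1) (by omega) (fun j hj1 hj2 => hp j hj1 (by omega))]
          have hv : p i = false := by rw [hcond]; simp [h2]
          simp [List.find?, hv]
      · rw [if_neg h1, ih (i - 1) (by omega) (fun j hj1 hj2 => hp j hj1 (by omega))]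
        have hv : p i = false := by rw [hcond]; simp [h1]
        simp [List.find?, hv]

-- all? find? congruence over a shared list
theorem find?_congr_mem (p q : Int → Bool) (l : List Int) (h : ∀ x ∈ l, p x = q x) :
    l.find? p = l.find? q := by
  induction l with
  | nil => rfl
  | cons x xs ih =>
      have hx := h x (by simp)
      simp only [List.find?]
      rw [← hx]
      cases p x
      · exact ih (fun y hy => h y (by simp [hy]))
      · rfl

-- ===== VERDICT (by name: the statement is the Claim_ definition above) =====
-- the two per-candidate conditions agree on every candidate of the scanned range
theorem cond_eq (low : List Int) (left right i : Int) (hl : 0 ≤ left) (hr : 0 ≤ right)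
    (hi1 : left + 1 ≤ i) (hi2 : i < (low.length : Int) - right) :
    pivotCond low left right i = condB low left right i := by
  unfold pivotCond condB
  rw [left_eq low left i hl hi1, right_eq low right i hr (by omega) hi2]

theorem pivot_low_spec : Claim_equal_pivot_low := by
  intro low left right _hdom hpre
  unfold Spec_pivot_low pivot_low pivot_low_alt
  by_cases hn : (low.length : Int) < left + right + 1
  · simp [hn]
  · rcases hpre with ⟨hl, hr⟩ | hdeg
    swap
    · -- degenerate width n = left + right + 1: both loops run over an empty range
      simp only [hn, if_false]
      have hA : pivotLoopA low left right ((low.length : Int) - right - 1) = some none := by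
        unfold pivotLoopA
        rw [dif_neg (by omega : ¬ left < (low.length : Int) - right - 1)]
      have hB : scanB (prevPass low) (nextPass low) left right
          ((low.length : Int) - right - 1) = some none := by
        unfold scanB
        rw [dif_neg (by omega : ¬ left < (low.length : Int) - right - 1)]
      rw [hA, hB]
    · simp only [hn, if_false]
      have hlook : ∀ j : Int, left < j → j ≤ (low.length : Int) - right - 1 →
          ∃ pj qj, PySem.List.pyGet? (prevPass low) j = some pj ∧
            PySem.List.pyGet? (nextPass low) j = some qj ∧
            condB low left right j = (decide (left < j - pj) && decide (right < qj - j)) := by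
        intro j h1 h2
        have hjlen : j.toNat < low.length := by omega
        refine ⟨prevSpec low j.toNat, nextSpec low j.toNat, ?_, ?_, rfl⟩
        · rw [show j = ((j.toNat : Nat) : Int) by omega, PySem.List.pyGet?_natCast,
              prevPass_eq]
          simp [hjlen]
          rw [show (max j 0).toNat = j.toNat by omega]
        · rw [show j = ((j.toNat : Nat) : Int) by omega, PySem.List.pyGet?_natCast,
              nextPass_eq]
          simp [hjlen]
          rw [show (max j 0).toNat = j.toNat by omega]
      rw [loopA_eq low left right (pivotCond low left right)
            ((low.length : Int) - right - 1 - left).toNat ((low.length : Int) - right - 1) rfl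
            (fun j h1 h2 => checkA?_eq low left right j hl hr (by omega) (by omega)),
          loopB_eq (prevPass low) (nextPass low) left right (condB low left right)
            ((low.length : Int) - right - 1 - left).toNat ((low.length : Int) - right - 1) rfl
            hlook]
      dsimp only
      rw [find?_congr_mem (pivotCond low left right) (condB low left right) _ (by
        intro x hx
        rw [PySem.List.mem_pyRange_neg_one] at hx
        exact cond_eq low left right x hl hr (by omega) (by omega))]
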